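-- pv_equiv track=rewrite | github.com/turumputum/moduleBox | pyTest/mqtt_broker_test.py | _replace_mqtt_section
-- ===== SOURCE A (Python) =====
-- def _replace_mqtt_section(full_config: str, mqtt_section: str) -> str:
--     """Заменяет секцию [MQTT] в конфигурации или добавляет в конец."""
--     lines = full_config.splitlines()
--     result = []
--     skip = False
--     found = False
--     for line in lines:
--         stripped = line.strip()
--         if stripped.startswith("[MQTT]"):
--             skip = True
--             found = True
--             # вставляем новую секцию
--             result.append(mqtt_section.rstrip())
--             continue
--         if skip and stripped.startswith("["):
--             skip = False
--         if not skip: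
--             result.append(line)
--     if not found:
--         result.append("")
--         result.append(mqtt_section.rstrip())
--     return "\r\n".join(result) + "\r\n"
-- ===== SOURCE B (Python) =====
-- def _split_at_header(ls):
--     """Split ls into (lines before the first section header, rest starting at it)."""
--     for i, l in enumerate(ls):
--         if l.strip().startswith("["):
--             return ls[:i], ls[i:]
--     return ls, []
--
--
-- def _replace_mqtt_section(full_config: str, mqtt_section: str) -> str:
--     repl = mqtt_section.rstrip()
--     pre, sections = _split_at_header(full_config.splitlines())
--     out = list(pre)
--     found = False
--     while sections:
--         header, rest = sections[0], sections[1:]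
--         body, sections = _split_at_header(rest)
--         if header.strip().startswith("[MQTT]"):
--             found = True
--             out.append(repl)
--         else:
--             out.append(header)
--             out.extend(body)
--     if not found:
--         out.extend(["", repl])
--     return "\r\n".join(out) + "\r\n"
-- ===== Notes on version B (the rewrite author's own statement) =====
-- stated objective: alternative
-- what changed: B replaces A's single stateful scan with a skip flag by a two-phase decomposition: split the lines into a preamble plus header-delimited sections, then emit each section whole (an MQTT section collapses to the replacement line).
import Mathlib
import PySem

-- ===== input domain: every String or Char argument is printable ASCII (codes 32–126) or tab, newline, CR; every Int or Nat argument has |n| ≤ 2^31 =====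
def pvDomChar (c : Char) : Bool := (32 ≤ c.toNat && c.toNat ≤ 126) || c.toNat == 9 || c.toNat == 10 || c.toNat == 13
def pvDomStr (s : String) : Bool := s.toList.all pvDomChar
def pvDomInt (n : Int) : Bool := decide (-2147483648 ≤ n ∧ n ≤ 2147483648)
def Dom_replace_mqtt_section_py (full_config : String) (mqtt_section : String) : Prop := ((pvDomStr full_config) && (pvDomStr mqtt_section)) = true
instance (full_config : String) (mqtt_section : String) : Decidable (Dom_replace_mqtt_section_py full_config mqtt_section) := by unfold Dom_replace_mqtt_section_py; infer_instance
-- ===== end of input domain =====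

-- B restructures A's stateful skip-flag scan as preamble + header-delimited sections emitted whole; same return value (alternative decomposition, not faster).

-- ===== PORT A =====
-- A's for-loop over lines carrying (skip, found), as the obvious structural recursion over the same state.
def pvLoopA (m : String) : List String → Bool → List String × Bool
  | [], _ => ([], false)
  | l :: ls, skip =>
    let stripped := PySem.Str.strip l
    if PySem.Str.startswith stripped "[MQTT]" then
      let r := pvLoopA m ls true
      (m :: r.1, true)
    else
      let skip' := if skip && PySem.Str.startswith stripped "[" then false else skip
      let r := pvLoopA m ls skip'
      (if !skip' then l :: r.1 else r.1, r.2)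

def replace_mqtt_section_py (full_config : String) (mqtt_section : String) : String :=
  let lines := PySem.Str.splitlines full_config
  let r := pvLoopA (PySem.Str.rstrip mqtt_section) lines false
  let result := if !r.2 then r.1 ++ ["", PySem.Str.rstrip mqtt_section] else r.1
  PySem.Str.join "\r\n" result ++ "\r\n"

-- ===== PORT B =====
def pvSplitAtHeader (ls : List String) : List String × List String :=
  (ls.takeWhile (fun l => !PySem.Str.startswith (PySem.Str.strip l) "["),
   ls.dropWhile (fun l => !PySem.Str.startswith (PySem.Str.strip l) "["))

def pvEmitSections (m : String) : List String → List String × Bool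
  | [] => ([], false)
  | h :: ls =>
    let body := (pvSplitAtHeader ls).1
    let rest := (pvSplitAtHeader ls).2
    let r := pvEmitSections m rest
    if PySem.Str.startswith (PySem.Str.strip h) "[MQTT]" then (m :: r.1, true)
    else (h :: (body ++ r.1), r.2)
  termination_by ls => ls.length
  decreasing_by
    simp only [pvSplitAtHeader]
    exact Nat.lt_succ_of_le (List.length_dropWhile_le _ _)

def replace_mqtt_section_py_alt (full_config : String) (mqtt_section : String) : String :=
  let repl := PySem.Str.rstrip mqtt_section
  let pre := (pvSplitAtHeader (PySem.Str.splitlines full_config)).1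
  let sections := (pvSplitAtHeader (PySem.Str.splitlines full_config)).2
  let r := pvEmitSections repl sections
  let out := pre ++ r.1
  let out := if !r.2 then out ++ ["", repl] else out
  PySem.Str.join "\r\n" out ++ "\r\n"

-- ===== PRECONDITION & SPEC =====
def Spec_replace_mqtt_section_py (full_config : String) (mqtt_section : String) (out : String) : Prop := out = replace_mqtt_section_py_alt full_config mqtt_section
instance (full_config : String) (mqtt_section : String) (out : String) : Decidable (Spec_replace_mqtt_section_py full_config mqtt_section out) := by unfold Spec_replace_mqtt_section_py; infer_instance

-- ===== CLAIM (what is proved, stated in full; the proofs are below) =====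
def Claim_equal_replace_mqtt_section_py : Prop := ∀ (full_config : String) (mqtt_section : String), Dom_replace_mqtt_section_py full_config mqtt_section → Spec_replace_mqtt_section_py full_config mqtt_section (replace_mqtt_section_py full_config mqtt_section)

-- ===== LEMMAS AND PROOFS =====

-- a line whose strip starts with "[MQTT]" also starts with "["
lemma pv_mqtt_is_header (s : String) (h : PySem.Str.startswith (PySem.Str.strip s) "[MQTT]" = true) :
    PySem.Str.startswith (PySem.Str.strip s) "[" = true := by
  simp only [PySem.Str.startswith_eq] at *
  rw [PySem.Chars.startswith_iff] at *
  exact List.IsPrefix.trans (by decide) h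

lemma pv_loopA_eq (m : String) (ls : List String) :
    pvLoopA m ls false =
      ((ls.takeWhile (fun l => !PySem.Str.startswith (PySem.Str.strip l) "[")) ++
        (pvEmitSections m (ls.dropWhile (fun l => !PySem.Str.startswith (PySem.Str.strip l) "["))).1,
       (pvEmitSections m (ls.dropWhile (fun l => !PySem.Str.startswith (PySem.Str.strip l) "["))).2) ∧
    pvLoopA m ls true =
      pvEmitSections m (ls.dropWhile (fun l => !PySem.Str.startswith (PySem.Str.strip l) "[")) := by
  induction ls with
  | nil => simp [pvLoopA, pvEmitSections]
  | cons l ls ih =>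
    by_cases hM : PySem.Str.startswith (PySem.Str.strip l) "[MQTT]" = true
    · have hH := pv_mqtt_is_header l hM
      simp at hM hH
      constructor <;>
        simp [pvLoopA, pvEmitSections, pvSplitAtHeader, hM, hH, ih.2]
    · by_cases hH : PySem.Str.startswith (PySem.Str.strip l) "[" = true
      · simp at hM hH
        constructor <;>
          simp [pvLoopA, pvEmitSections, pvSplitAtHeader, hM, hH, ih.1]
      · simp at hM hH
        constructor <;>
          simp [pvLoopA, hM, hH, ih.1, ih.2]

-- ===== VERDICT (by name: the statement is the Claim_ definition above) =====
theorem replace_mqtt_section_py_spec : Claim_equal_replace_mqtt_section_py := by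
  intro full_config mqtt_section _
  unfold Spec_replace_mqtt_section_py replace_mqtt_section_py replace_mqtt_section_py_alt
  simp only [pvSplitAtHeader,
    (pv_loopA_eq (PySem.Str.rstrip mqtt_section) (PySem.Str.splitlines full_config)).1,
    List.append_assoc]
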